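-- pv_equiv track=rewrite | github.com/techeer-sv/coteto | jimin/week3/medium.py | solution
-- ===== SOURCE A (Python) =====
-- def solution(cards1, cards2, goal):
--     for i in goal:
--         if cards1 and cards1[0]==i:
--             cards1.remove(i)
--         elif cards2 and cards2[0]==i:
--             cards2.remove(i)
--         else:
--             return "No"
--     return "Yes"
-- ===== SOURCE B (Python) =====
-- def solution(cards1, cards2, goal):
--     # Two index pointers into the fronts of cards1/cards2; no list mutation.
--     i = j = 0
--     for g in goal:
--         if i < len(cards1) and cards1[i] == g:
--             i += 1
--         elif j < len(cards2) and cards2[j] == g: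
--             j += 1
--         else:
--             return "No"
--     return "Yes"
-- ===== Notes on version B (the rewrite author's own statement) =====
-- stated objective: faster
-- what changed: Replaces the per-step list.remove of the matching front (an O(n) shift each iteration, and it mutates cards1/cards2 in place) by two index pointers advanced over the unchanged lists.
import Mathlib
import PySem

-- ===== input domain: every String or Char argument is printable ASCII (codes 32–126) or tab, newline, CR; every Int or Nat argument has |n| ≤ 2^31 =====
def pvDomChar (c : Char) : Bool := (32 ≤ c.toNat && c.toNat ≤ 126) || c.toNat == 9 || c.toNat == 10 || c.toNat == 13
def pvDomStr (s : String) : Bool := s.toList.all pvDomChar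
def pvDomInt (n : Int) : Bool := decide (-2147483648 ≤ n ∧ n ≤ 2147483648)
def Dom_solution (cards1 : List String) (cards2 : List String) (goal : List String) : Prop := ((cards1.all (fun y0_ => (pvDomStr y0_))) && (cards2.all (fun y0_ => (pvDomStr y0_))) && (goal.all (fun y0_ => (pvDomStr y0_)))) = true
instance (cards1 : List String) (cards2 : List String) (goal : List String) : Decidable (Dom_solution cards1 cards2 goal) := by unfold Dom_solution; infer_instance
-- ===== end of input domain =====

-- B replaces A's per-step list.remove by two index pointers over the unchanged lists;
-- A mutates cards1/cards2 in place (B does not): the equivalence proved here is about the return value only.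

-- ===== PORT A =====
-- A's loop over goal, popping the matching front via list.remove (which, the guard
-- ensures, removes the head: remove? never returns none in the taken branch).
def solution (cards1 : List String) (cards2 : List String) (goal : List String) : String :=
  match goal with
  | [] => "Yes"
  | i :: rest =>
    if cards1 ≠ [] ∧ cards1.headD "" = i then
      solution ((PySem.List.remove? cards1 i).getD []) cards2 rest
    else if cards2 ≠ [] ∧ cards2.headD "" = i then
      solution cards1 ((PySem.List.remove? cards2 i).getD []) rest
    else "No"

-- ===== PORT B =====
def solutionAltLoop (cards1 : List String) (cards2 : List String) (i j : Nat) (goal : List String) : String :=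
  match goal with
  | [] => "Yes"
  | g :: rest =>
    if i < cards1.length ∧ cards1.getD i "" = g then
      solutionAltLoop cards1 cards2 (i + 1) j rest
    else if j < cards2.length ∧ cards2.getD j "" = g then
      solutionAltLoop cards1 cards2 i (j + 1) rest
    else "No"

def solution_alt (cards1 : List String) (cards2 : List String) (goal : List String) : String :=
  solutionAltLoop cards1 cards2 0 0 goal

-- ===== PRECONDITION & SPEC =====
def Spec_solution (cards1 : List String) (cards2 : List String) (goal : List String) (out : String) : Prop := out = solution_alt cards1 cards2 goal
instance (cards1 : List String) (cards2 : List String) (goal : List String) (out : String) : Decidable (Spec_solution cards1 cards2 goal out) := by unfold Spec_solution; infer_instance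

-- ===== CLAIM (what is proved, stated in full; the proofs are below) =====
def Claim_equal_solution : Prop := ∀ (cards1 : List String) (cards2 : List String) (goal : List String), Dom_solution cards1 cards2 goal → Spec_solution cards1 cards2 goal (solution cards1 cards2 goal)

-- ===== LEMMAS AND PROOFS =====

theorem getD_of_drop_cons (c : List String) (i : Nat) (x : String) (xs : List String)
    (h : c.drop i = x :: xs) : c.getD i "" = x := by
  have h0 := List.getElem?_drop (xs := c) (i := i) (j := 0)
  rw [h] at h0
  simp at h0
  simp [List.getD, ← h0]

-- The front test on a suffix equals the indexed test on the full list.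
theorem drop_front_test (c : List String) (i : Nat) (g : String) :
    (c.drop i ≠ [] ∧ (c.drop i).headD "" = g) ↔ (i < c.length ∧ c.getD i "" = g) := by
  constructor
  · rintro ⟨hne, hh⟩
    have hlt : i < c.length := by
      by_contra h
      exact hne (List.drop_eq_nil_of_le (by omega))
    refine ⟨hlt, ?_⟩
    rcases h : c.drop i with _ | ⟨x, xs⟩
    · exact absurd h hne
    · have hg := getD_of_drop_cons c i x xs h
      rw [h] at hh; rw [hg]; exact hh
  · rintro ⟨hlt, hg⟩
    have hne : c.drop i ≠ [] := by
      simp [List.drop_eq_nil_iff]; omega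
    refine ⟨hne, ?_⟩
    rcases h : c.drop i with _ | ⟨x, xs⟩
    · exact absurd h hne
    · have hx := getD_of_drop_cons c i x xs h
      rw [← hg]; exact hx.symm

theorem remove_front (c : List String) (i : Nat) (g : String)
    (h : c.drop i ≠ [] ∧ (c.drop i).headD "" = g) :
    (PySem.List.remove? (c.drop i) g).getD [] = c.drop (i + 1) := by
  rcases hd : c.drop i with _ | ⟨x, xs⟩
  · exact absurd hd h.1
  · have hx : x = g := by simpa [hd] using h.2
    subst hx
    have : c.drop (i + 1) = xs := by
      have ht := List.tail_drop (l := c) (i := i)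
      rw [hd] at ht
      exact ht.symm
    simp [PySem.List.remove?_cons_self, this]

theorem solution_drop (goal : List String) (c1 c2 : List String) (i j : Nat) :
    solution (c1.drop i) (c2.drop j) goal = solutionAltLoop c1 c2 i j goal := by
  induction goal generalizing i j with
  | nil => rfl
  | cons g rest ih =>
    rw [solution, solutionAltLoop]
    by_cases h1 : c1.drop i ≠ [] ∧ (c1.drop i).headD "" = g
    · rw [if_pos h1, if_pos ((drop_front_test c1 i g).mp h1),
        remove_front c1 i g h1, ih]
    · rw [if_neg h1, if_neg (fun h => h1 ((drop_front_test c1 i g).mpr h))]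
      by_cases h2 : c2.drop j ≠ [] ∧ (c2.drop j).headD "" = g
      · rw [if_pos h2, if_pos ((drop_front_test c2 j g).mp h2),
          remove_front c2 j g h2, ih]
      · rw [if_neg h2, if_neg (fun h => h2 ((drop_front_test c2 j g).mpr h))]

-- ===== VERDICT (by name: the statement is the Claim_ definition above) =====
theorem solution_spec : Claim_equal_solution := by
  intro c1 c2 goal _
  have := solution_drop goal c1 c2 0 0
  simpa [Spec_solution, solution_alt] using this
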